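-- pv_equiv track=rewrite | github.com/artfaal/pi-dashboard | backend/modules/router.py | _parse_dev_bytes
-- ===== SOURCE A (Python) =====
-- def _parse_dev_bytes(proc_net_dev: str, iface: str = "wan") -> tuple[int, int]:
--     """Return (rx_bytes, tx_bytes) for the given interface from /proc/net/dev."""
--     for line in proc_net_dev.splitlines():
--         line = line.strip()
--         if line.startswith(iface + ":"):
--             parts = line.split()
--             try:
--                 return int(parts[1]), int(parts[9])
--             except (IndexError, ValueError):
--                 break
--     return 0, 0
-- ===== SOURCE B (Python) =====
-- def _parse_dev_bytes(proc_net_dev: str, iface: str = "wan") -> tuple[int, int]: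
--     """Return (rx_bytes, tx_bytes) for the given interface from /proc/net/dev."""
--     table = {}
--     for raw in proc_net_dev.splitlines():
--         line = raw.strip()
--         i = line.find(":")
--         if i != -1:
--             name = line[:i]
--             if name not in table:
--                 table[name] = line.split()
--     parts = table.get(iface)
--     if parts is None:
--         return 0, 0
--     try:
--         return int(parts[1]), int(parts[9])
--     except (IndexError, ValueError):
--         return 0, 0
-- ===== Notes on version B (the rewrite author's own statement) =====
-- stated objective: alternative
-- what changed: B replaces A's scan-with-early-return by an index build: one pass populates a first-occurrence dict from each line's before-colon name to its split fields, then a single dict lookup of iface followed by the int-parse with the (0,0) fallback.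
-- outside the precondition, e.g. on _parse_dev_bytes('a:b: 1 2 3 4 5 6 7 8 9 10', 'a:b'): A returns (1, 9), B returns (0, 0)
import Mathlib
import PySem

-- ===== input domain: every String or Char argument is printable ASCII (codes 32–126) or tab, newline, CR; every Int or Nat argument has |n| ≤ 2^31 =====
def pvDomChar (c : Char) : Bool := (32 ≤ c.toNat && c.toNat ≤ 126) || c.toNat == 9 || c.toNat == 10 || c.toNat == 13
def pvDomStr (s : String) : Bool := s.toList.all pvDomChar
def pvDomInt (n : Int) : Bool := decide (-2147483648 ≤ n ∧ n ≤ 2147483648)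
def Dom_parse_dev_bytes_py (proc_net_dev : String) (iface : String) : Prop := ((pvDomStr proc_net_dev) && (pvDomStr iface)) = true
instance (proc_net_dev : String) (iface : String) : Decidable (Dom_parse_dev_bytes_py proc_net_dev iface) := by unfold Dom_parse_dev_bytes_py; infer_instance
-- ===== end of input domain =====

-- B replaces A's scan-with-early-return by an index build (first-occurrence dict keyed by the
-- before-colon name) followed by one lookup; same cost, different structure (objective: alternative).

-- ===== PORT A =====
-- try: return int(parts[1]), int(parts[9])  — none = IndexError/ValueError
def pvTryA (parts : List String) : Option (Int × Int) :=
  match PySem.List.pyGet? parts 1 with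
  | none => none
  | some s1 =>
    match PySem.Int.ofStr? s1 with
    | none => none
    | some x =>
      match PySem.List.pyGet? parts 9 with
      | none => none
      | some s9 =>
        match PySem.Int.ofStr? s9 with
        | none => none
        | some y => some (x, y)

-- the 'for line in proc_net_dev.splitlines()' loop (break and fall-through both end in (0, 0))
def pvLoopA (iface : String) : List String → Int × Int
  | [] => (0, 0)
  | l :: rest =>
    let line := PySem.Str.strip l
    if PySem.Str.startswith line (iface ++ ":") then
      match pvTryA (PySem.Str.split₀ line) with
      | some v => v
      | none => (0, 0)
    else pvLoopA iface rest

def parse_dev_bytes_py (proc_net_dev : String) (iface : String) : Int × Int :=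
  pvLoopA iface (PySem.Str.splitlines proc_net_dev)

-- ===== PORT B =====
-- loop body: strip, find ':', key the first-occurrence dict by line[:i]
def pvStepB (table : PySem.Dict String (List String)) (raw : String) : PySem.Dict String (List String) :=
  let line := PySem.Str.strip raw
  let i := PySem.Str.find line ":"
  if i ≠ -1 then
    let name := PySem.Str.slice line none (some i)
    if table.contains name then table
    else table.insert name (PySem.Str.split₀ line)
  else table

-- try/except returning (0, 0) on IndexError/ValueError
def pvTryB (parts : List String) : Int × Int :=
  match PySem.List.pyGet? parts 1 with
  | none => (0, 0)
  | some s1 =>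
    match PySem.Int.ofStr? s1 with
    | none => (0, 0)
    | some x =>
      match PySem.List.pyGet? parts 9 with
      | none => (0, 0)
      | some s9 =>
        match PySem.Int.ofStr? s9 with
        | none => (0, 0)
        | some y => (x, y)

def parse_dev_bytes_py_alt (proc_net_dev : String) (iface : String) : Int × Int :=
  let table := (PySem.Str.splitlines proc_net_dev).foldl pvStepB PySem.Dict.empty
  match table.get? iface with
  | none => (0, 0)
  | some parts => pvTryB parts

-- ===== PRECONDITION & SPEC =====
-- Pre_ excludes only ifaces containing ':' — there A's startswith(iface+":") test and B's keying by
-- the text before the FIRST colon are both defensible readings and can disagree; real interface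
-- names never contain ':'.
def Pre_parse_dev_bytes_py (proc_net_dev : String) (iface : String) : Prop :=
  ':' ∉ iface.toList
instance (proc_net_dev : String) (iface : String) : Decidable (Pre_parse_dev_bytes_py proc_net_dev iface) := by unfold Pre_parse_dev_bytes_py; infer_instance

def pvWitness_parse_dev_bytes_py : String × String := ("wan: 1 2 3 4 5 6 7 8 9 10", "wan")

def Spec_parse_dev_bytes_py (proc_net_dev : String) (iface : String) (out : Int × Int) : Prop := out = parse_dev_bytes_py_alt proc_net_dev iface
instance (proc_net_dev : String) (iface : String) (out : Int × Int) : Decidable (Spec_parse_dev_bytes_py proc_net_dev iface out) := by unfold Spec_parse_dev_bytes_py; infer_instance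

-- ===== CLAIM (what is proved, stated in full; the proofs are below) =====
def Claim_equal_parse_dev_bytes_py : Prop := ∀ (proc_net_dev : String) (iface : String), Dom_parse_dev_bytes_py proc_net_dev iface → Pre_parse_dev_bytes_py proc_net_dev iface → Spec_parse_dev_bytes_py proc_net_dev iface (parse_dev_bytes_py proc_net_dev iface)

-- ===== LEMMAS AND PROOFS =====

-- the split-fields of the first line A's scan matches (proof-only helper)
def pvFirstA (iface : String) : List String → Option (List String)
  | [] => none
  | l :: rest =>
    let line := PySem.Str.strip l
    if PySem.Str.startswith line (iface ++ ":") then some (PySem.Str.split₀ line)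
    else pvFirstA iface rest

lemma pvLoopA_eq_firstA (iface : String) (ls : List String) :
    pvLoopA iface ls =
      match pvFirstA iface ls with
      | none => (0, 0)
      | some p => (match pvTryA p with | some v => v | none => (0, 0)) := by
  induction ls with
  | nil => rfl
  | cons l rest ih =>
    simp only [pvLoopA, pvFirstA]
    split_ifs with h <;> simp [ih]

lemma pvTryB_eq (p : List String) :
    pvTryB p = (match pvTryA p with | some v => v | none => (0, 0)) := by
  unfold pvTryA pvTryB
  rcases PySem.List.pyGet? p 1 with _ | s1 <;> simp
  rcases PySem.Int.ofStr? s1 with _ | x <;> simp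
  rcases PySem.List.pyGet? p 9 with _ | s9 <;> simp
  rcases PySem.Int.ofStr? s9 with _ | y <;> simp

-- the keying equivalence, on the char-list side: for a colon-free iface, A's startswith test holds
-- exactly when the line has a colon and the text before its FIRST colon is iface
lemma pvKeyChars (cs t : List Char) (h : ':' ∉ t) :
    PySem.Chars.startswith cs (t ++ [':']) = true ↔
      (PySem.Chars.find cs [':'] ≠ -1 ∧
        PySem.List.slice cs none (some (PySem.Chars.find cs [':'])) = t) := by
  rw [PySem.Chars.startswith_iff]
  constructor
  · rintro ⟨r, hr⟩
    have hcs : cs = t ++ ([':'] ++ r) := by rw [← hr, List.append_assoc]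
    have hinf : [':'] <:+: cs := ⟨t, r, by simpa using hr⟩
    have hne : PySem.Chars.find cs [':'] ≠ -1 := (PySem.Chars.find_ne_neg_one_iff cs [':']).mpr hinf
    have hnn : 0 ≤ PySem.Chars.find cs [':'] := by
      have := PySem.Chars.neg_one_le_find cs [':']; omega
    obtain ⟨hpre, hmin⟩ := PySem.Chars.find_spec hnn
    set i := (PySem.Chars.find cs [':']).toNat with hi
    have hdrop : cs.drop t.length = ':' :: r := by
      rw [← hr]; simpa using List.drop_left (t ++ [':']) r
    have hle : i ≤ t.length := by
      by_contra hlt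
      exact hmin t.length (by omega) ⟨r, by simpa using hdrop.symm⟩
    have hge : ¬ i < t.length := by
      intro hlt
      obtain ⟨r', hr'⟩ := hpre
      have hgetd : cs[i]? = some ':' := by
        have h0 : (cs.drop i)[0]? = some ':' := by rw [← hr']; simp
        rwa [List.getElem?_drop, Nat.add_zero] at h0
      have hgett : cs[i]? = t[i]? := by
        rw [hcs]; exact List.getElem?_append_left (by simpa using hlt)
      have : ':' ∈ t := by
        apply List.mem_of_getElem? (i := i); rw [← hgett, hgetd]
      exact h this
    have hieq : i = t.length := by omega
    refine ⟨hne, ?_⟩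
    rw [PySem.List.slice_to cs hnn, ← hi, hieq, ← hr]
    simpa using List.take_left t ([':'] ++ r)
  · rintro ⟨hne, hsl⟩
    have hnn : 0 ≤ PySem.Chars.find cs [':'] := by
      have := PySem.Chars.neg_one_le_find cs [':']; omega
    obtain ⟨hpre, -⟩ := PySem.Chars.find_spec hnn
    obtain ⟨r, hr⟩ := hpre
    rw [PySem.List.slice_to cs hnn] at hsl
    refine ⟨r, ?_⟩
    calc t ++ [':'] ++ r = cs.take (PySem.Chars.find cs [':']).toNat ++ ([':'] ++ r) := by
            rw [hsl]; simp
      _ = cs := by rw [hr]; exact List.take_append_drop _ cs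

-- the same statement lifted to Strings (the forms the two ports use)
lemma pvKeyStr (line iface : String) (h : ':' ∉ iface.toList) :
    PySem.Str.startswith line (iface ++ ":") = true ↔
      (PySem.Str.find line ":" ≠ -1 ∧
        PySem.Str.slice line none (some (PySem.Str.find line ":")) = iface) := by
  have hcol : (":" : String).toList = [':'] := by decide
  rw [PySem.Str.startswith_eq, PySem.Str.find_eq, hcol]
  simp only [String.toList_append, hcol]
  rw [pvKeyChars line.toList iface.toList h]
  have hsl : PySem.Str.slice line none (some (PySem.Chars.find line.toList [':'])) = iface
      ↔ PySem.List.slice line.toList none (some (PySem.Chars.find line.toList [':'])) = iface.toList := by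
    rw [← String.toList_inj, PySem.Str.toList_slice, PySem.Chars.slice_eq_listSlice]
  exact and_congr Iff.rfl hsl.symm

-- what one loop step of B contributes to the eventual lookup of iface
lemma pvStepB_get (d : PySem.Dict String (List String)) (l iface : String)
    (h : ':' ∉ iface.toList) :
    (pvStepB d l).get? iface =
      (d.get? iface).or
        (if PySem.Str.startswith (PySem.Str.strip l) (iface ++ ":") = true
         then some (PySem.Str.split₀ (PySem.Str.strip l)) else none) := by
  simp only [pvStepB]
  by_cases hf : PySem.Str.find (PySem.Str.strip l) ":" = -1
  · have hsw : ¬ PySem.Str.startswith (PySem.Str.strip l) (iface ++ ":") = true := by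
      intro hsw; exact ((pvKeyStr _ iface h).mp hsw).1 hf
    rw [if_neg (by simpa using hf), if_neg hsw, Option.or_none]
  · rw [if_pos hf]
    by_cases hn : PySem.Str.slice (PySem.Str.strip l) none
        (some (PySem.Str.find (PySem.Str.strip l) ":")) = iface
    · have hsw : PySem.Str.startswith (PySem.Str.strip l) (iface ++ ":") = true :=
        (pvKeyStr _ iface h).mpr ⟨hf, hn⟩
      rw [if_pos hsw]
      by_cases hc : PySem.Dict.contains d (PySem.Str.slice (PySem.Str.strip l) none
          (some (PySem.Str.find (PySem.Str.strip l) ":"))) = true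
      · rw [if_pos hc]
        have hsome : (d.get? iface).isSome := by
          rw [← PySem.Dict.contains_eq_isSome_get?, ← hn]; exact hc
        obtain ⟨v, hv⟩ := Option.isSome_iff_exists.mp hsome
        rw [hv, Option.some_or]
      · rw [if_neg hc, hn, PySem.Dict.get?_insert_self]
        have hnone : d.get? iface = none := by
          apply Option.not_isSome_iff_eq_none.mp
          rw [← PySem.Dict.contains_eq_isSome_get?, ← hn]
          exact hc
        rw [hnone, Option.none_or]
    · have hsw : ¬ PySem.Str.startswith (PySem.Str.strip l) (iface ++ ":") = true := by
        intro hsw; exact hn ((pvKeyStr _ iface h).mp hsw).2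
      rw [if_neg hsw, Option.or_none]
      by_cases hc : PySem.Dict.contains d (PySem.Str.slice (PySem.Str.strip l) none
          (some (PySem.Str.find (PySem.Str.strip l) ":"))) = true
      · rw [if_pos hc]
      · rw [if_neg hc, PySem.Dict.get?_insert_of_ne d _ (fun he => hn he.symm)]

-- the dict built by B's pass answers the lookup with exactly A's first match
lemma pvFold_get (iface : String) (h : ':' ∉ iface.toList) (ls : List String)
    (d : PySem.Dict String (List String)) :
    (ls.foldl pvStepB d).get? iface = (d.get? iface).or (pvFirstA iface ls) := by
  induction ls generalizing d with
  | nil => simp only [List.foldl_nil, pvFirstA, Option.or_none]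
  | cons l rest ih =>
    rw [List.foldl_cons, ih, pvStepB_get d l iface h]
    have hfa : pvFirstA iface (l :: rest) =
        (if PySem.Str.startswith (PySem.Str.strip l) (iface ++ ":") = true
         then some (PySem.Str.split₀ (PySem.Str.strip l)) else none).or (pvFirstA iface rest) := by
      simp only [pvFirstA]
      split
      · rw [Option.some_or]
      · rw [Option.none_or]
    rw [hfa, Option.or_assoc]

-- ===== VERDICT (by name: the statement is the Claim_ definition above) =====
theorem parse_dev_bytes_py_spec : Claim_equal_parse_dev_bytes_py := by
  intro proc_net_dev iface _hdom hpre
  unfold Spec_parse_dev_bytes_py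
  simp only [parse_dev_bytes_py, parse_dev_bytes_py_alt]
  rw [pvLoopA_eq_firstA, pvFold_get iface hpre _ PySem.Dict.empty, PySem.Dict.get?_empty,
    Option.none_or]
  rcases pvFirstA iface (PySem.Str.splitlines proc_net_dev) with _ | q
  · rfl
  · exact (pvTryB_eq q).symm
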